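-- pv_equiv track=rewrite | github.com/SWT92/hackerrank_flipmatrix | method2.py | getRemainder
-- ===== SOURCE A (Python) =====
-- def getRemainder(matrix):
--     maxAmount = []
--     quadEdge = len(matrix) // 2
--     limit = len(matrix) - 1
--     for row in range(quadEdge):
--         for col in range(quadEdge):
--             topLeft = matrix[row][col]
--             topRight = matrix[row][limit-col]
--             bottomLeft = matrix[limit-row][col]
--             bottomRight = matrix[limit-row][limit-col]
--             maxAmount.append(max(topLeft, topRight, bottomLeft, bottomRight))
--             maxAmount.sort()
--     return maxAmount
-- ===== SOURCE B (Python) =====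
-- def getRemainder(matrix):
--     # Single full-matrix scan: each cell is mapped to its canonical quadrant
--     # orbit (min(r, n-1-r), min(c, n-1-c)); a dict keeps the running maximum
--     # per orbit, and the dict's values are sorted once at the end.
--     n = len(matrix)
--     q = n // 2
--     best = {}
--     for r, row in enumerate(matrix):
--         i = min(r, n - 1 - r)
--         if i >= q:
--             continue
--         for c, v in enumerate(row):
--             j = min(c, n - 1 - c)
--             if 0 <= j < q:
--                 k = (i, j)
--                 if k not in best or v > best[k]:
--                     best[k] = v
--     return sorted(best.values())
-- ===== Notes on version B (the rewrite author's own statement) =====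
-- stated objective: faster
-- what changed: B makes one forward scan of the whole matrix, mapping each cell to its canonical quadrant orbit (min(r,n-1-r), min(c,n-1-c)) and max-reducing into a dict keyed by orbit, then sorts the dict values once; A indexes the four mirrored corners per quadrant cell and re-sorts the whole accumulator after every single append.
import Mathlib
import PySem

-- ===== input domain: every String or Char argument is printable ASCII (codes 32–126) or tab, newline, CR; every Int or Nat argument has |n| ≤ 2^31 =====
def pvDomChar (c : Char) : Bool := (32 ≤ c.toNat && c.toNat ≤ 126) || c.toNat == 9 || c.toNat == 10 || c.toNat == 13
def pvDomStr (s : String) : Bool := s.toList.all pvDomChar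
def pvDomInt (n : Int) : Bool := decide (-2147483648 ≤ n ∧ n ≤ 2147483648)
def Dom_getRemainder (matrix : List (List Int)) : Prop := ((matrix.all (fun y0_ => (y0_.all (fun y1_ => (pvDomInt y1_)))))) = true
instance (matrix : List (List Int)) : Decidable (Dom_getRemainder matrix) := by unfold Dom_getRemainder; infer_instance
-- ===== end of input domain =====

-- B replaces A's mirrored four-corner indexing (with a re-sort after every append) by one
-- forward scan of the whole matrix that reduces each cell into a dict of per-orbit maxima
-- keyed by its canonical quadrant coordinate, sorting the dict's values once at the end.

-- ===== PORT A =====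
def getRemainder (matrix : List (List Int)) : List Int :=
  let quadEdge := PySem.Int.floordiv (matrix.length : Int) 2
  let limit : Int := (matrix.length : Int) - 1
  (PySem.List.pyRange 0 quadEdge 1).foldl (fun acc row =>
    (PySem.List.pyRange 0 quadEdge 1).foldl (fun acc col =>
      let topLeft := PySem.List.pyGetD (PySem.List.pyGetD matrix row []) col 0
      let topRight := PySem.List.pyGetD (PySem.List.pyGetD matrix row []) (limit - col) 0
      let bottomLeft := PySem.List.pyGetD (PySem.List.pyGetD matrix (limit - row) []) col 0
      let bottomRight := PySem.List.pyGetD (PySem.List.pyGetD matrix (limit - row) []) (limit - col) 0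
      PySem.List.sorted (acc ++ [max (max (max topLeft topRight) bottomLeft) bottomRight]) (fun x => x) false)
      acc) []

-- ===== PORT B =====
def getRemainder_alt (matrix : List (List Int)) : List Int :=
  let n : Int := (matrix.length : Int)
  let q := PySem.Int.floordiv n 2
  let best := (PySem.List.enumerate matrix).foldl (fun best rrow =>
    if q ≤ min rrow.1 (n - 1 - rrow.1) then best   -- i >= q: continue
    else (PySem.List.enumerate rrow.2).foldl (fun best cv =>
      if 0 ≤ min cv.1 (n - 1 - cv.1) ∧ min cv.1 (n - 1 - cv.1) < q then
        (if best.contains (min rrow.1 (n - 1 - rrow.1), min cv.1 (n - 1 - cv.1)) = false ∨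
            best.getD (min rrow.1 (n - 1 - rrow.1), min cv.1 (n - 1 - cv.1)) 0 < cv.2 then
          best.insert (min rrow.1 (n - 1 - rrow.1), min cv.1 (n - 1 - cv.1)) cv.2
        else best)
      else best) best) PySem.Dict.empty
  PySem.List.sorted best.values (fun x => x) false

-- ===== PRECONDITION & SPEC =====
-- Pre_ excludes exactly the inputs on which A raises IndexError: some accessed row
-- (one of the first or last len(matrix)//2 rows) is shorter than len(matrix).
def Pre_getRemainder (matrix : List (List Int)) : Prop :=
  ∀ i, i < matrix.length / 2 →
    matrix.length ≤ (matrix.getD i []).length ∧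
    matrix.length ≤ (matrix.getD (matrix.length - 1 - i) []).length
instance (matrix : List (List Int)) : Decidable (Pre_getRemainder matrix) := by
  unfold Pre_getRemainder; infer_instance

def pvWitness_getRemainder : List (List Int) := [[1, 2, 3], [4, 5, 6], [7, 8, 9]]

def Spec_getRemainder (matrix : List (List Int)) (out : List Int) : Prop := out = getRemainder_alt matrix
instance (matrix : List (List Int)) (out : List Int) : Decidable (Spec_getRemainder matrix out) := by unfold Spec_getRemainder; infer_instance

-- ===== CLAIM (what is proved, stated in full; the proofs are below) =====
def Claim_equal_getRemainder : Prop := ∀ (matrix : List (List Int)), Dom_getRemainder matrix → Pre_getRemainder matrix → Spec_getRemainder matrix (getRemainder matrix)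

-- ===== LEMMAS AND PROOFS =====

-- abbreviations
def pvN (matrix : List (List Int)) : Int := (matrix.length : Int)
def pvQ (matrix : List (List Int)) : Int := ((matrix.length / 2 : Nat) : Int)

-- the four-corner maximum A computes for quadrant cell (r, c)
def pvM4 (matrix : List (List Int)) (r c : Int) : Int :=
  max (max (max (PySem.List.pyGetD (PySem.List.pyGetD matrix r []) c 0)
                (PySem.List.pyGetD (PySem.List.pyGetD matrix r []) (pvN matrix - 1 - c) 0))
           (PySem.List.pyGetD (PySem.List.pyGetD matrix (pvN matrix - 1 - r) []) c 0))
      (PySem.List.pyGetD (PySem.List.pyGetD matrix (pvN matrix - 1 - r) []) (pvN matrix - 1 - c) 0)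

-- the quadrant index block, row-major
def pvBlock (matrix : List (List Int)) : List (Int × Int) :=
  (PySem.List.pyRange 0 (pvQ matrix) 1).flatMap (fun r =>
    (PySem.List.pyRange 0 (pvQ matrix) 1).map (fun c => (r, c)))

-- B's scan, flattened: the stream of (orbit key, value) pairs B reduces into the dict
def pvCells (matrix : List (List Int)) : List ((Int × Int) × Int) :=
  (PySem.List.enumerate matrix).flatMap (fun rrow =>
    if pvQ matrix ≤ min rrow.1 (pvN matrix - 1 - rrow.1) then []
    else ((PySem.List.enumerate rrow.2).filter (fun cv =>
            decide (0 ≤ min cv.1 (pvN matrix - 1 - cv.1) ∧ min cv.1 (pvN matrix - 1 - cv.1) < pvQ matrix))).map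
          (fun cv => ((min rrow.1 (pvN matrix - 1 - rrow.1), min cv.1 (pvN matrix - 1 - cv.1)), cv.2)))

-- one dict reduction step of B, and its effect on a single lookup
def pvUpd (d : PySem.Dict (Int × Int) Int) (p : (Int × Int) × Int) : PySem.Dict (Int × Int) Int :=
  if d.contains p.1 = false ∨ d.getD p.1 0 < p.2 then d.insert p.1 p.2 else d

def pvStep (o : Option Int) (v : Int) : Option Int :=
  some (match o with | none => v | some w => max w v)

-- B's program equals the single final sort of the values of the dict folded over pvCells
lemma pv_alt_eq_cells (matrix : List (List Int)) :
    getRemainder_alt matrix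
      = PySem.List.sorted ((pvCells matrix).foldl pvUpd PySem.Dict.empty).values (fun x => x) false := by
  unfold getRemainder_alt
  have hq : PySem.Int.floordiv (matrix.length : Int) 2 = pvQ matrix := by
    exact_mod_cast PySem.Int.floordiv_natCast matrix.length 2
  simp only [hq]
  congr 1
  rw [pvCells, List.foldl_flatMap]
  congr 1
  apply PySem.List.foldl_congr_mem
  intro d x hx
  by_cases hcond : pvQ matrix ≤ min x.1 ((matrix.length : Int) - 1 - x.1)
  · rw [if_pos (by simpa [pvN] using hcond), if_pos (by simpa [pvN] using hcond)]
    rfl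
  · rw [if_neg (by simpa [pvN] using hcond), if_neg (by simpa [pvN] using hcond)]
    rw [List.foldl_map, PySem.List.foldl_ite_eq_foldl_filter
      (p := fun cv : Int × Int => 0 ≤ min cv.1 ((matrix.length:Int) - 1 - cv.1) ∧ min cv.1 ((matrix.length:Int) - 1 - cv.1) < pvQ matrix)]
    simp only [pvUpd, pvN]
    rfl

-- one pvUpd step seen through get?
lemma pv_get?_upd (d : PySem.Dict (Int × Int) Int) (p : (Int × Int) × Int) (k : Int × Int) :
    (pvUpd d p).get? k = if k = p.1 then pvStep (d.get? p.1) p.2 else d.get? k := by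
  unfold pvUpd pvStep
  rcases hcc : d.get? p.1 with _ | w
  · have hc : d.contains p.1 = false := (PySem.Dict.get?_eq_none_iff_contains d p.1).1 hcc
    rw [if_pos (Or.inl hc), PySem.Dict.get?_insert]
  · have hc : d.contains p.1 = true := by
      have := (PySem.Dict.get?_eq_none_iff_contains d p.1)
      rcases h : d.contains p.1 with _|_
      · rw [this.2 h] at hcc; cases hcc
      · rfl
    have hgd : d.getD p.1 0 = w := by rw [PySem.Dict.getD_eq_get?_getD, hcc]; rfl
    rw [hc, hgd]
    by_cases hlt : w < p.2
    · rw [if_pos (Or.inr hlt), PySem.Dict.get?_insert]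
      split_ifs with hk
      · simp only []
        congr 1
        omega
      · rfl
    · rw [if_neg (by simp [hlt])]
      split_ifs with hk
      · rw [hk, hcc]
        simp only []
        congr 1
        omega
      · rfl

-- the dict fold seen through get?: a per-key max-reduce of the key's value stream
lemma pv_get?_foldl_upd (L : List ((Int × Int) × Int)) (d : PySem.Dict (Int × Int) Int) (k : Int × Int) :
    (L.foldl pvUpd d).get? k
      = ((L.filter (fun p => decide (p.1 = k))).map (·.2)).foldl pvStep (d.get? k) := by
  induction L generalizing d with
  | nil => simp
  | cons p L ih =>
    simp only [List.foldl_cons, List.filter_cons]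
    rw [ih]
    by_cases hk : p.1 = k
    · rw [if_pos (by simpa using hk)]
      simp only [List.map_cons, List.foldl_cons]
      rw [pv_get?_upd, if_pos hk.symm, hk]
    · rw [if_neg (by simpa using hk)]
      rw [pv_get?_upd, if_neg (fun h => hk h.symm)]

lemma pv_keys_upd (d : PySem.Dict (Int × Int) Int) (p : (Int × Int) × Int) :
    (pvUpd d p).keys = PySem.Set.add d.keys p.1 := by
  unfold pvUpd
  rcases hc : d.contains p.1 with _|_
  · rw [if_pos (Or.inl rfl), PySem.Dict.keys_insert_of_not_contains d p.2 hc]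
    have : ¬ p.1 ∈ d.keys := fun h => by
      rw [(PySem.Dict.contains_iff_mem_keys d p.1).2 h] at hc; cases hc
    simp [PySem.Set.add, this]
  · have hmem : p.1 ∈ d.keys := (PySem.Dict.contains_iff_mem_keys d p.1).1 hc
    have hadd : PySem.Set.add d.keys p.1 = d.keys := by simp [PySem.Set.add, hmem]
    by_cases hlt : d.getD p.1 0 < p.2
    · rw [if_pos (Or.inr hlt), PySem.Dict.keys_insert_of_contains d p.2 hc, hadd]
    · rw [if_neg (by simp [hlt]), hadd]

lemma pv_keys_foldl_upd (L : List ((Int × Int) × Int)) (d : PySem.Dict (Int × Int) Int) :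
    (L.foldl pvUpd d).keys = PySem.Set.update d.keys (L.map (·.1)) := by
  induction L generalizing d with
  | nil => simp [PySem.Set.update]
  | cons p L ih =>
    simp only [List.foldl_cons, List.map_cons]
    rw [ih, pv_keys_upd]
    rfl

-- two-point support computations over List.range
lemma pv_range_filter_two (x y : Nat) (hxy : x < y) (L : Nat) :
    (List.range L).filter (fun c => decide (c = x ∨ c = y))
      = (if x < L then [x] else []) ++ (if y < L then [y] else []) := by
  induction L with
  | zero => simp
  | succ L ih =>
    rw [List.range_succ, List.filter_append, ih]
    by_cases h1 : L = x
    · subst h1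
      simp [show L < L + 1 from by omega,
            show ¬ y < L from by omega, show ¬ y < L + 1 from by omega]
    · by_cases h2 : L = y
      · subst h2
        simp [show x < L from hxy, show x < L + 1 from by omega,
              show L < L + 1 from by omega, h1]
      · have hno : ¬ (L = x ∨ L = y) := by omega
        simp [hno, show (x < L + 1) ↔ (x < L) from by omega,
              show (y < L + 1) ↔ (y < L) from by omega]

lemma pv_range_flatMap_two {α : Type} (f : Nat → List α) (x y : Nat) (hxy : x < y)
    (hf : ∀ c, c ≠ x → c ≠ y → f c = []) (L : Nat) :
    (List.range L).flatMap f = (if x < L then f x else []) ++ (if y < L then f y else []) := by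
  induction L with
  | zero => simp
  | succ L ih =>
    rw [List.range_succ, List.flatMap_append, ih]
    by_cases h1 : L = x
    · subst h1
      simp [show L < L + 1 from by omega,
            show ¬ y < L from by omega, show ¬ y < L + 1 from by omega]
    · by_cases h2 : L = y
      · subst h2
        simp [show x < L from hxy, show x < L + 1 from by omega,
              show L < L + 1 from by omega]
      · rw [show List.flatMap f [L] = [] from by simp [hf L h1 h2]]
        simp [show (x < L + 1) ↔ (x < L) from by omega,
              show (y < L + 1) ↔ (y < L) from by omega]

-- the two columns of one mirrored row pair that feed orbit (a, b)
lemma pv_row_contrib (matrix : List (List Int)) (a b r : Int) (row : List Int)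
    (ha0 : 0 ≤ a) (haq : a < pvQ matrix) (hb0 : 0 ≤ b) (hbq : b < pvQ matrix)
    (hr : min r (pvN matrix - 1 - r) = a)
    (hlen : matrix.length ≤ row.length) :
    ((if pvQ matrix ≤ min r (pvN matrix - 1 - r) then ([] : List ((Int × Int) × Int)) else
        ((PySem.List.enumerate row).filter (fun cv =>
            decide (0 ≤ min cv.1 (pvN matrix - 1 - cv.1) ∧ min cv.1 (pvN matrix - 1 - cv.1) < pvQ matrix))).map
          (fun cv => ((min r (pvN matrix - 1 - r), min cv.1 (pvN matrix - 1 - cv.1)), cv.2))).filter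
      (fun p => decide (p.1 = (a, b)))).map (·.2)
      = [PySem.List.pyGetD row b 0, PySem.List.pyGetD row (pvN matrix - 1 - b) 0] := by
  have hQN : 2 * pvQ matrix ≤ pvN matrix := by unfold pvQ pvN; omega
  rw [if_neg (by omega)]
  rw [List.filter_map, List.map_map, List.filter_filter]
  rw [PySem.List.enumerate_eq_map_pyRange row 0]
  rw [show PySem.List.len row = ((row.length : Nat) : Int) by simp [PySem.List.len]]
  rw [PySem.List.pyRange_zero_natCast, List.map_map, List.filter_map, List.map_map]
  rw [List.filter_congr (q := fun cn => decide (cn = b.toNat ∨ cn = (pvN matrix - 1 - b).toNat)) ?_]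
  · rw [pv_range_filter_two b.toNat (pvN matrix - 1 - b).toNat (by unfold pvN at *; omega) row.length]
    rw [if_pos (by unfold pvN at *; omega), if_pos (by unfold pvN at *; omega)]
    simp only [List.map_append, List.map_cons, List.map_nil, Function.comp_apply]
    rw [show ((b.toNat : Int)) = b by omega,
        show (((pvN matrix - 1 - b).toNat : Int)) = pvN matrix - 1 - b by unfold pvN at *; omega]
    rfl
  · intro cn _
    simp only [Function.comp_apply, Prod.mk.injEq]
    rw [← Bool.decide_and, decide_eq_decide]
    constructor
    · rintro ⟨⟨_, h2⟩, _, h4⟩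
      omega
    · intro h
      exact ⟨⟨hr, by omega⟩, by omega, by omega⟩

-- pvCells re-indexed over List.range
lemma pv_cells_range_form (matrix : List (List Int)) :
    pvCells matrix = (List.range matrix.length).flatMap (fun (rn : Nat) =>
      if pvQ matrix ≤ min (rn : Int) (pvN matrix - 1 - (rn : Int)) then []
      else ((PySem.List.enumerate (PySem.List.pyGetD matrix (rn : Int) [])).filter (fun cv =>
              decide (0 ≤ min cv.1 (pvN matrix - 1 - cv.1) ∧ min cv.1 (pvN matrix - 1 - cv.1) < pvQ matrix))).map
            (fun cv => ((min (rn : Int) (pvN matrix - 1 - (rn : Int)), min cv.1 (pvN matrix - 1 - cv.1)), cv.2))) := by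
  rw [pvCells, PySem.List.enumerate_eq_map_pyRange matrix []]
  rw [show PySem.List.len matrix = ((matrix.length : Nat) : Int) by simp [PySem.List.len]]
  rw [PySem.List.pyRange_zero_natCast, List.map_map, List.flatMap_map]
  rfl

-- the value stream B reduces into orbit (a, b): exactly A's four corners, in A's order
lemma pv_cells_filter (matrix : List (List Int)) (hpre : Pre_getRemainder matrix)
    (a b : Int) (ha : 0 ≤ a ∧ a < pvQ matrix) (hb : 0 ≤ b ∧ b < pvQ matrix) :
    ((pvCells matrix).filter (fun p => decide (p.1 = (a, b)))).map (·.2)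
      = [PySem.List.pyGetD (PySem.List.pyGetD matrix a []) b 0,
         PySem.List.pyGetD (PySem.List.pyGetD matrix a []) (pvN matrix - 1 - b) 0,
         PySem.List.pyGetD (PySem.List.pyGetD matrix (pvN matrix - 1 - a) []) b 0,
         PySem.List.pyGetD (PySem.List.pyGetD matrix (pvN matrix - 1 - a) []) (pvN matrix - 1 - b) 0] := by
  obtain ⟨ha0, haq⟩ := ha
  obtain ⟨hb0, hbq⟩ := hb
  have hQN : 2 * pvQ matrix ≤ pvN matrix := by unfold pvQ pvN; omega
  rw [pv_cells_range_form, List.filter_flatMap, List.map_flatMap]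
  rw [pv_range_flatMap_two _ a.toNat (pvN matrix - 1 - a).toNat (by unfold pvN at *; omega) ?hf matrix.length]
  case hf =>
    intro rn h1 h2
    by_cases hc : pvQ matrix ≤ min (rn : Int) (pvN matrix - 1 - (rn : Int))
    · rw [if_pos hc]; rfl
    · rw [if_neg hc]
      rw [List.filter_map]
      rw [List.filter_eq_nil_iff.2 ?_]
      · rfl
      · intro cv _
        simp only [Function.comp_apply, Prod.mk.injEq, decide_eq_true_eq, not_and]
        intro hia
        exfalso
        unfold pvN pvQ at *
        omega
  · rw [if_pos (show a.toNat < matrix.length by unfold pvN pvQ at *; omega),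
        if_pos (show (pvN matrix - 1 - a).toNat < matrix.length by unfold pvN pvQ at *; omega)]
    have h1 := pv_row_contrib matrix a b ((a.toNat : Nat) : Int) (PySem.List.pyGetD matrix ((a.toNat : Nat) : Int) [])
      ha0 haq hb0 hbq (by unfold pvN at *; omega) ?_
    · have h2 := pv_row_contrib matrix a b (((pvN matrix - 1 - a).toNat : Nat) : Int)
        (PySem.List.pyGetD matrix (((pvN matrix - 1 - a).toNat : Nat) : Int) [])
        ha0 haq hb0 hbq (by unfold pvN at *; omega) ?_
      · rw [h1, h2]
        rw [show ((a.toNat : Nat) : Int) = a by omega,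
            show (((pvN matrix - 1 - a).toNat : Nat) : Int) = pvN matrix - 1 - a by unfold pvN at *; omega]
        rfl
      · rw [PySem.List.pyGetD_natCast]
        have := (hpre a.toNat (by unfold pvN pvQ at *; omega)).2
        rw [show matrix.length - 1 - a.toNat = (pvN matrix - 1 - a).toNat by unfold pvN at *; omega] at this
        exact this
    · rw [PySem.List.pyGetD_natCast]
      exact (hpre a.toNat (by unfold pvN pvQ at *; omega)).1

lemma pv_mem_block (matrix : List (List Int)) (k : Int × Int) :
    k ∈ pvBlock matrix ↔ 0 ≤ k.1 ∧ k.1 < pvQ matrix ∧ 0 ≤ k.2 ∧ k.2 < pvQ matrix := by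
  simp [pvBlock, List.mem_flatMap, PySem.List.mem_pyRange_one]
  constructor
  · rintro ⟨r, ⟨hr0, hrq⟩, c, ⟨hc0, hcq⟩, rfl⟩
    exact ⟨hr0, hrq, hc0, hcq⟩
  · rintro ⟨h1, h2, h3, h4⟩
    exact ⟨k.1, ⟨h1, h2⟩, k.2, ⟨h3, h4⟩, rfl⟩

lemma pv_block_nodup (matrix : List (List Int)) : (pvBlock matrix).Nodup := by
  rw [pvBlock]
  rw [List.nodup_flatMap]
  constructor
  · intro r _
    apply List.Nodup.map
    · intro a b hab
      simpa using congrArg Prod.snd hab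
    · rw [pvQ, PySem.List.pyRange_zero_natCast]
      exact List.nodup_range.map (fun a b h => by exact_mod_cast h)
  · rw [pvQ, PySem.List.pyRange_zero_natCast]
    rw [List.pairwise_map]
    apply List.Pairwise.imp ?_ (List.pairwise_lt_range)
    intro a b hab p hp hq
    simp at hp hq
    obtain ⟨c, _, rfl⟩ := hp
    obtain ⟨c', _, h⟩ := hq
    have := congrArg Prod.fst h
    simp at this
    omega

-- the orbit keys B's dict collects are exactly the quadrant block
lemma pv_mem_cells_keys (matrix : List (List Int)) (hpre : Pre_getRemainder matrix) (k : Int × Int) :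
    k ∈ (pvCells matrix).map (·.1) ↔ k ∈ pvBlock matrix := by
  have hQN : 2 * pvQ matrix ≤ pvN matrix := by unfold pvQ pvN; omega
  rw [pv_mem_block, pv_cells_range_form]
  constructor
  · intro hk
    simp only [List.mem_map, List.mem_flatMap, List.mem_range] at hk
    obtain ⟨p, ⟨rn, hrn, hp⟩, rfl⟩ := hk
    by_cases hc : pvQ matrix ≤ min (rn : Int) (pvN matrix - 1 - (rn : Int))
    · rw [if_pos hc] at hp
      simp at hp
    · rw [if_neg hc] at hp
      simp only [List.mem_map, List.mem_filter, decide_eq_true_eq] at hp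
      obtain ⟨cv, ⟨_, hcv⟩, rfl⟩ := hp
      refine ⟨?_, ?_, ?_, ?_⟩ <;> simp only [] <;> unfold pvN pvQ at * <;> omega
  · intro hk
    obtain ⟨h1, h2, h3, h4⟩ := hk
    simp only [List.mem_map, List.mem_flatMap, List.mem_range]
    refine ⟨((min (k.1.toNat : Int) (pvN matrix - 1 - (k.1.toNat : Int)),
        min (k.2.toNat : Int) (pvN matrix - 1 - (k.2.toNat : Int))),
        PySem.List.pyGetD (PySem.List.pyGetD matrix (k.1.toNat : Int) []) (k.2.toNat : Int) 0), ⟨k.1.toNat, ?_, ?_⟩, ?_⟩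
    · unfold pvN pvQ at *; omega
    · rw [if_neg (by unfold pvN pvQ at *; omega)]
      simp only [List.mem_map, List.mem_filter, decide_eq_true_eq]
      refine ⟨((k.2.toNat : Int), PySem.List.pyGetD (PySem.List.pyGetD matrix (k.1.toNat : Int) []) (k.2.toNat : Int) 0), ⟨?_, ?_⟩, rfl⟩
      · rw [PySem.List.mem_enumerate_iff]
        have hlenrow : k.2.toNat < (PySem.List.pyGetD matrix (k.1.toNat : Int) []).length := by
          rw [PySem.List.pyGetD_natCast]
          have := (hpre k.1.toNat (by unfold pvN pvQ at *; omega)).1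
          unfold pvN pvQ at *; omega
        refine ⟨k.2.toNat, hlenrow, ?_⟩
        rw [show (0:Int) + (k.2.toNat:Int) = (k.2.toNat:Int) by ring,
            PySem.List.pyGetD_natCast, List.getD_eq_getElem _ _ hlenrow]
      · unfold pvN pvQ at *
        constructor <;> omega
    · simp only []
      have e1 : min (k.1.toNat : Int) (pvN matrix - 1 - (k.1.toNat : Int)) = k.1 := by unfold pvN pvQ at *; omega
      have e2 : min (k.2.toNat : Int) (pvN matrix - 1 - (k.2.toNat : Int)) = k.2 := by unfold pvN pvQ at *; omega
      rw [e1, e2]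

-- A's program equals the single final sort of its value stream
lemma pv_sort_append_one (l : List Int) (x : Int) :
    PySem.List.sorted (PySem.List.sorted l (fun y => y) false ++ [x]) (fun y => y) false
      = PySem.List.sorted (l ++ [x]) (fun y => y) false := by
  apply PySem.List.sorted_eq_sorted_of_perm
  · exact fun a b h => h
  · exact (PySem.List.sorted_perm l _ _).append_right [x]

lemma pv_fold_sort_inner (v : Int → Int) :
    ∀ (idx : List Int) (acc : List Int),
      idx.foldl (fun a c => PySem.List.sorted (a ++ [v c]) (fun y => y) false)
          (PySem.List.sorted acc (fun y => y) false)
        = PySem.List.sorted (acc ++ idx.map v) (fun y => y) false := by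
  intro idx
  induction idx with
  | nil => intro acc; simp
  | cons c idx ih =>
    intro acc
    simp only [List.foldl_cons, List.map_cons]
    rw [pv_sort_append_one, ih (acc ++ [v c])]
    simp

lemma pv_fold_sort_outer (cols : List Int) (w : Int → Int → Int) :
    ∀ (rows : List Int) (acc : List Int),
      rows.foldl (fun a r =>
          cols.foldl (fun a2 c => PySem.List.sorted (a2 ++ [w r c]) (fun y => y) false) a)
          (PySem.List.sorted acc (fun y => y) false)
        = PySem.List.sorted (acc ++ rows.flatMap (fun r => cols.map (w r))) (fun y => y) false := by
  intro rows
  induction rows with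
  | nil => intro acc; simp
  | cons r rows ih =>
    intro acc
    simp only [List.foldl_cons, List.flatMap_cons]
    rw [pv_fold_sort_inner (w r) cols acc, ih (acc ++ cols.map (w r))]
    simp

lemma pv_a_eq_sorted (matrix : List (List Int)) :
    getRemainder matrix
      = PySem.List.sorted ((pvBlock matrix).map (fun p => pvM4 matrix p.1 p.2)) (fun x => x) false := by
  unfold getRemainder
  have hq : PySem.Int.floordiv (matrix.length : Int) 2 = pvQ matrix := by
    exact_mod_cast PySem.Int.floordiv_natCast matrix.length 2
  simp only [hq]
  have hA := pv_fold_sort_outer (PySem.List.pyRange 0 (pvQ matrix) 1)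
    (fun r c => pvM4 matrix r c) (PySem.List.pyRange 0 (pvQ matrix) 1) []
  simp only [List.nil_append, pvM4, pvN] at hA
  rw [show (PySem.List.sorted ([] : List Int) (fun y => y) false) = [] from rfl] at hA
  rw [hA]
  congr 1
  simp [pvBlock, List.map_flatMap, List.map_map, Function.comp_def, pvM4, pvN]

-- the final dict's value at each orbit key is A's four-corner maximum
lemma pv_getD_final (matrix : List (List Int)) (hpre : Pre_getRemainder matrix) (k : Int × Int)
    (hk : k ∈ pvBlock matrix) :
    ((pvCells matrix).foldl pvUpd PySem.Dict.empty).getD k 0 = pvM4 matrix k.1 k.2 := by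
  obtain ⟨h1, h2, h3, h4⟩ := (pv_mem_block matrix k).1 hk
  rw [PySem.Dict.getD_eq_get?_getD, pv_get?_foldl_upd, PySem.Dict.get?_empty]
  have hcf := pv_cells_filter matrix hpre k.1 k.2 ⟨h1, h2⟩ ⟨h3, h4⟩
  rw [show (fun p : (Int × Int) × Int => decide (p.1 = k)) = (fun p : (Int × Int) × Int => decide (p.1 = (k.1, k.2))) by rfl]
  rw [hcf]
  simp only [List.foldl_cons, List.foldl_nil, pvStep, Option.getD_some, pvM4]

theorem getRemainder_eq (matrix : List (List Int)) (hpre : Pre_getRemainder matrix) :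
    getRemainder matrix = getRemainder_alt matrix := by
  rw [pv_a_eq_sorted, pv_alt_eq_cells]
  set D := (pvCells matrix).foldl pvUpd PySem.Dict.empty with hD
  have hkeys : D.keys = PySem.Set.ofList ((pvCells matrix).map (·.1)) := by
    rw [hD, pv_keys_foldl_upd]
    rfl
  have hnodup : D.keys.Nodup := by rw [hkeys]; exact PySem.Set.nodup_ofList _
  have hperm : D.keys.Perm (pvBlock matrix) :=
    (List.perm_ext_iff_of_nodup hnodup (pv_block_nodup matrix)).2
      (fun k => by rw [hkeys, PySem.Set.mem_ofList]; exact pv_mem_cells_keys matrix hpre k)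
  have hvals : D.values = D.keys.map (fun k => D.getD k 0) := PySem.Dict.values_eq_map_keys D hnodup 0
  apply PySem.List.sorted_eq_sorted_of_perm _ _ _ (fun a b h => h)
  have hmapeq : (pvBlock matrix).map (fun k => D.getD k 0) = (pvBlock matrix).map (fun p => pvM4 matrix p.1 p.2) :=
    List.map_congr_left (fun k hk => pv_getD_final matrix hpre k hk)
  rw [hvals, ← hmapeq]
  exact (hperm.map _).symm

-- ===== VERDICT (by name: the statement is the Claim_ definition above) =====
theorem getRemainder_spec : Claim_equal_getRemainder := by
  intro matrix _ hpre
  exact getRemainder_eq matrix hpre
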